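-- pv_equiv track=rewrite | github.com/gogotape/yandex_algorithms_5.0 | lesson3/task_A.py | find_common_tracks
-- ===== SOURCE A (Python) =====
-- def find_common_tracks(playlists):
--     if not playlists:
--         return []
--
--     common = {elem for elem in playlists[0]}
--     for current_playlist in playlists:
--         common = common.intersection(set(current_playlist))
--
--     common_tracks = list(common)
--     common_tracks.sort()
--     return common_tracks
-- ===== SOURCE B (Python) =====
-- def find_common_tracks(playlists):
--     sets = [set(pl) for pl in playlists]
--     union = sorted({t for s in sets for t in s})
--     return [t for t in union if sum(t in s for s in sets) == len(sets)]
-- ===== Notes on version B (the rewrite author's own statement) =====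
-- stated objective: simpler
-- what changed: Replaces A's iterated intersection-accumulator loop by a single comprehension: turn each playlist into a set once, sort the union of all tracks, and keep those whose membership count equals the number of playlists (the empty input needs no guard).
import Mathlib
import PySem

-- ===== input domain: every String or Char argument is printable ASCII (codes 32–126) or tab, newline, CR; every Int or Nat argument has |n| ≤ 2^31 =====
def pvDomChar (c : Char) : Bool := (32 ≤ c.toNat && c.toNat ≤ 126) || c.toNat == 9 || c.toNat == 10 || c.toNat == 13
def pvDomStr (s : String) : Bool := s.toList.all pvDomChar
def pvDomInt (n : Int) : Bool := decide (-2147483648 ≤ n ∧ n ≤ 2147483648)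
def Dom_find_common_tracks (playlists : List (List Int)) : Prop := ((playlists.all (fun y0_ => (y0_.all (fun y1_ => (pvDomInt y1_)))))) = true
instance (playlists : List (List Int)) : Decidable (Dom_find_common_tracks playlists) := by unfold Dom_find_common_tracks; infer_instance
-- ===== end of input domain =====

-- B replaces A's iterated set-intersection loop by one pass: sort the union of all
-- tracks once and keep those contained in every playlist (objective: simpler).

-- ===== PORT A =====
def find_common_tracks (playlists : List (List Int)) : List Int :=
  match playlists with
  | [] => []
  | first :: _ =>
    -- common = {elem for elem in playlists[0]}; intersect with each playlist's set in turn
    let common := playlists.foldl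
      (fun c cur => c.filter (fun y => decide (y ∈ PySem.Set.ofList cur)))
      (PySem.Set.ofList first)
    PySem.List.sorted common (fun x => x) false

-- ===== PORT B =====
def find_common_tracks_alt (playlists : List (List Int)) : List Int :=
  let sets := playlists.map (fun pl => PySem.Set.ofList pl)
  let union := PySem.List.sorted (PySem.Set.ofList (sets.flatMap (fun s => s))) (fun x => x) false
  union.filter (fun t =>
    decide ((sets.map (fun s => if t ∈ s then (1:Int) else 0)).sum = sets.length))

-- ===== PRECONDITION & SPEC =====
def Spec_find_common_tracks (playlists : List (List Int)) (out : List Int) : Prop := out = find_common_tracks_alt playlists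
instance (playlists : List (List Int)) (out : List Int) : Decidable (Spec_find_common_tracks playlists out) := by unfold Spec_find_common_tracks; infer_instance

-- ===== CLAIM (what is proved, stated in full; the proofs are below) =====
def Claim_equal_find_common_tracks : Prop := ∀ (playlists : List (List Int)), Dom_find_common_tracks playlists → Spec_find_common_tracks playlists (find_common_tracks playlists)

-- ===== LEMMAS AND PROOFS =====

-- membership in A's intersection fold
theorem mem_foldl_filter (ls : List (List Int)) (acc : List Int) (x : Int) :
    x ∈ ls.foldl (fun c cur => c.filter (fun y => decide (y ∈ PySem.Set.ofList cur))) acc ↔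
      x ∈ acc ∧ ∀ pl ∈ ls, x ∈ pl := by
  induction ls generalizing acc with
  | nil => simp
  | cons hd tl ih =>
    rw [List.foldl_cons, ih]
    simp only [List.mem_filter, PySem.Set.mem_ofList, List.mem_cons, decide_eq_true_eq]
    constructor
    · rintro ⟨⟨hx, hhd⟩, htl⟩
      refine ⟨hx, fun pl hpl => ?_⟩
      rcases hpl with rfl | hpl
      · exact hhd
      · exact htl pl hpl
    · rintro ⟨hx, hall⟩
      exact ⟨⟨hx, hall hd (Or.inl rfl)⟩, fun pl hpl => hall pl (Or.inr hpl)⟩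

-- A's fold keeps the accumulator duplicate-free
theorem nodup_foldl_filter (ls : List (List Int)) (acc : List Int) (h : acc.Nodup) :
    (ls.foldl (fun c cur => c.filter (fun y => decide (y ∈ PySem.Set.ofList cur))) acc).Nodup := by
  induction ls generalizing acc with
  | nil => exact h
  | cons hd tl ih => exact ih _ (h.filter _)

-- B's 0/1 sum over the sets equals their number exactly when every set contains t
theorem sum_eq_len_iff (sets : List (List Int)) (t : Int) :
    ((sets.map (fun s => if t ∈ s then (1:Int) else 0)).sum = sets.length) ↔
      ∀ s ∈ sets, t ∈ s := by
  have hfe : (fun s : List Int => if t ∈ s then (1:Int) else 0)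
      = (fun s => if decide (t ∈ s) = true then (1:Int) else 0) := by
    funext s; simp
  rw [hfe, PySem.List.sum_map_ite_one_zero]
  rw [Int.natCast_inj, List.countP_eq_length]
  simp

-- ===== VERDICT (by name: the statement is the Claim_ definition above) =====
theorem find_common_tracks_spec : Claim_equal_find_common_tracks := by
  intro playlists _
  unfold Spec_find_common_tracks find_common_tracks find_common_tracks_alt
  cases playlists with
  | nil => rfl
  | cons first rest =>
    set ps := first :: rest with hps
    set LA := ps.foldl (fun c cur => c.filter (fun y => decide (y ∈ PySem.Set.ofList cur)))
      (PySem.Set.ofList first) with hLA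
    set sets := ps.map (fun pl => PySem.Set.ofList pl) with hsets
    set ys := (PySem.List.sorted (PySem.Set.ofList (sets.flatMap (fun s => s))) (fun x => x) false).filter
      (fun t => decide ((sets.map (fun s => if t ∈ s then (1:Int) else 0)).sum = sets.length)) with hys
    have hlt : ys.Pairwise (· < ·) :=
      List.Pairwise.filter _ (PySem.List.sorted_ofList_pairwise_lt _)
    have hysmem : ∀ x, x ∈ ys ↔ ∀ pl ∈ ps, x ∈ pl := by
      intro x
      rw [hys, List.mem_filter]
      simp only [PySem.List.mem_sorted, PySem.Set.mem_ofList, List.mem_flatMap,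
        decide_eq_true_eq, sum_eq_len_iff, hsets, List.mem_map]
      constructor
      · rintro ⟨-, h⟩ pl hpl
        exact (PySem.Set.mem_ofList _ _).mp (h _ ⟨pl, hpl, rfl⟩)
      · intro h
        refine ⟨⟨PySem.Set.ofList first, ⟨first, List.mem_cons_self, rfl⟩,
          (PySem.Set.mem_ofList _ _).mpr (h first List.mem_cons_self)⟩, ?_⟩
        rintro s ⟨pl, hpl, rfl⟩
        exact (PySem.Set.mem_ofList _ _).mpr (h pl hpl)
    have hLAmem : ∀ x, x ∈ LA ↔ ∀ pl ∈ ps, x ∈ pl := by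
      intro x
      rw [hLA, mem_foldl_filter]
      simp only [PySem.Set.mem_ofList]
      constructor
      · exact fun h => h.2
      · exact fun h => ⟨h first List.mem_cons_self, h⟩
    have hperm : ys.Perm LA := by
      refine (List.perm_ext_iff_of_nodup ?_ (nodup_foldl_filter _ _ (PySem.Set.nodup_ofList _))).mpr ?_
      · exact hlt.imp ne_of_lt
      · intro a; rw [hysmem, hLAmem]
    exact PySem.List.sorted_eq_of_perm_of_pairwise_lt _ _ (fun x => x) hperm hlt
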